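-- pv_equiv track=rewrite | github.com/peterolson/2024-advent-of-code | 19.py | count_ways_to_construct
-- ===== SOURCE A (Python) =====
-- def count_ways_to_construct(s: str, parts: set[str]) -> int:
--     n = len(s)
--     dp = [0] * (n + 1)
--     dp[0] = 1
--
--     for i in range(1, n + 1):
--         for j in range(i):
--             if dp[j] and s[j:i] in parts:
--                 dp[i] += dp[j]
--     return dp[n]
-- ===== SOURCE B (Python) =====
-- def count_ways_to_construct(s: str, parts: set[str]) -> int:
--     # DP over end positions, but at each position try each part directly
--     # (compare the tail of s against the part) instead of scanning all
--     # O(n) split points: O(n * |parts| * L) instead of O(n^2 * L).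
--     n = len(s)
--     dp = [1] + [0] * n
--     for i in range(1, n + 1):
--         dp[i] = sum(dp[i - len(p)] for p in parts
--                     if 0 < len(p) <= i and s[i - len(p):i] == p)
--     return dp[n]
-- ===== Notes on version B (the rewrite author's own statement) =====
-- stated objective: faster
-- what changed: A scans every split point j < i at each position (O(n^2) substring checks); B instead tries each part against the tail ending at i, so the work per position is bounded by the number of parts times the part length.
import Mathlib
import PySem

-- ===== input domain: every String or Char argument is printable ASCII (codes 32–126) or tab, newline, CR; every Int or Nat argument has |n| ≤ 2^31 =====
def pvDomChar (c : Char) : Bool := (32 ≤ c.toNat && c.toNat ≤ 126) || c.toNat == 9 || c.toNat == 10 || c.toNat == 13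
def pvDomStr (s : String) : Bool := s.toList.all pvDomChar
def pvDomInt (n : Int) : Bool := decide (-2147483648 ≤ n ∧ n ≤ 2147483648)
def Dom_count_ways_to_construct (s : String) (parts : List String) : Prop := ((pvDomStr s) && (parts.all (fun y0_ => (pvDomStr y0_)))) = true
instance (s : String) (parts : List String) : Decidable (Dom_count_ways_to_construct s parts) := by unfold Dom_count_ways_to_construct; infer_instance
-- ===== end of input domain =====

-- B counts segmentations by trying each part against the tail at every position instead of
-- scanning all split points: a faster algorithm with the same result on duplicate-free part lists.


-- ===== PORT A =====
def count_ways_to_construct (s : String) (parts : List String) : Int :=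
  let n : Int := PySem.Str.len s
  let dp0 : List Int := PySem.List.pySetD (List.replicate (n + 1).toNat (0 : Int)) 0 1
  let dp :=
    (PySem.List.pyRange 1 (n + 1) 1).foldl (fun dp i =>
      (PySem.List.pyRange 0 i 1).foldl (fun dp j =>
        if PySem.List.pyGetD dp j 0 ≠ 0 ∧ PySem.Str.slice s (some j) (some i) ∈ parts then
          PySem.List.pySetD dp i (PySem.List.pyGetD dp i 0 + PySem.List.pyGetD dp j 0)
        else dp) dp) dp0
  PySem.List.pyGetD dp n 0

-- ===== PORT B =====
def count_ways_to_construct_alt (s : String) (parts : List String) : Int :=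
  let n : Int := PySem.Str.len s
  let dp0 : List Int := [1] ++ List.replicate n.toNat (0 : Int)
  let dp :=
    (PySem.List.pyRange 1 (n + 1) 1).foldl (fun dp i =>
      PySem.List.pySetD dp i (parts.foldl (fun acc p =>
        if 0 < PySem.Str.len p ∧ PySem.Str.len p ≤ i ∧
            PySem.Str.slice s (some (i - PySem.Str.len p)) (some i) = p then
          acc + PySem.List.pyGetD dp (i - PySem.Str.len p) 0
        else acc) 0)) dp0
  PySem.List.pyGetD dp n 0

-- ===== PRECONDITION & SPEC =====
-- Pre_ excludes part lists with duplicate entries: 'parts' is a Python set (duplicate-free by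
-- construction); on a raw list with duplicates A's membership test counts each part once while
-- B iterates the entries, an accidental corner of the list encoding of a set.
def Pre_count_ways_to_construct (_s : String) (parts : List String) : Prop := parts.Nodup
instance (s : String) (parts : List String) : Decidable (Pre_count_ways_to_construct s parts) := by
  unfold Pre_count_ways_to_construct; infer_instance

def pvWitness_count_ways_to_construct : String × List String := ("abab", ["a", "b", "ab"])

def Spec_count_ways_to_construct (s : String) (parts : List String) (out : Int) : Prop := out = count_ways_to_construct_alt s parts
instance (s : String) (parts : List String) (out : Int) : Decidable (Spec_count_ways_to_construct s parts out) := by unfold Spec_count_ways_to_construct; infer_instance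

-- ===== CLAIM (what is proved, stated in full; the proofs are below) =====
def Claim_equal_count_ways_to_construct : Prop := ∀ (s : String) (parts : List String), Dom_count_ways_to_construct s parts → Pre_count_ways_to_construct s parts → Spec_count_ways_to_construct s parts (count_ways_to_construct s parts)

-- ===== LEMMAS AND PROOFS =====

lemma pvGetSet_self (dp : List Int) (i : Int) (v : Int) (h0 : 0 ≤ i) (hl : i.toNat < dp.length) :
    PySem.List.pyGetD (PySem.List.pySetD dp i v) i 0 = v := by
  rw [show i = ((i.toNat : Nat) : Int) from (Int.toNat_of_nonneg h0).symm,
    PySem.List.pyGetD_pySetD_natCast _ _ _ _ _ hl]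
  simp

lemma pvGetSet_ne (dp : List Int) (i j : Int) (v : Int) (h0 : 0 ≤ i) (hl : i.toNat < dp.length)
    (hj0 : 0 ≤ j) (hne : j ≠ i) :
    PySem.List.pyGetD (PySem.List.pySetD dp i v) j 0 = PySem.List.pyGetD dp j 0 := by
  rw [show i = ((i.toNat : Nat) : Int) from (Int.toNat_of_nonneg h0).symm,
    show j = ((j.toNat : Nat) : Int) from (Int.toNat_of_nonneg hj0).symm,
    PySem.List.pyGetD_pySetD_natCast _ _ _ _ _ hl]
  rw [if_neg]
  omega

lemma pvSetSet (dp : List Int) (i : Int) (v w : Int) (h0 : 0 ≤ i) :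
    PySem.List.pySetD (PySem.List.pySetD dp i v) i w = PySem.List.pySetD dp i w := by
  rw [PySem.List.pySetD_of_nonneg _ _ h0, PySem.List.pySetD_of_nonneg _ _ h0,
    PySem.List.pySetD_of_nonneg _ _ h0, List.set_set]

lemma pvSet_get_self (dp : List Int) (i : Int) (h0 : 0 ≤ i) (hl : i.toNat < dp.length) :
    PySem.List.pySetD dp i (PySem.List.pyGetD dp i 0) = dp := by
  rw [PySem.List.pySetD_of_nonneg _ _ h0,
    PySem.List.pyGetD_eq_getElem _ _ h0 (by omega), List.set_getElem_self]

lemma pvSum_zero {α : Type} (l : List α) (q : α → Prop) [DecidablePred q] (c : α → Int)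
    (h : ∀ x ∈ l, ¬ q x) : (l.map (fun x => if q x then c x else 0)).sum = 0 := by
  apply List.sum_eq_zero
  intro x hx
  obtain ⟨y, hy, rfl⟩ := List.mem_map.mp hx
  simp [h y hy]

lemma pvSum_ite_mem (l : List String) (v : String) (c : Int) (h : l.Nodup) :
    (l.map (fun p => if p = v then c else 0)).sum = if v ∈ l then c else 0 := by
  induction l with
  | nil => simp
  | cons p t ih =>
    simp only [List.nodup_cons] at h
    by_cases hp : p = v
    · subst hp
      rw [List.map_cons, List.sum_cons, if_pos rfl, if_pos (List.mem_cons_self ..),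
        pvSum_zero t (fun x => x = p) (fun _ => c) (by intro x hx hxp; exact h.1 (hxp ▸ hx))]
      ring
    · rw [List.map_cons, List.sum_cons, if_neg hp, ih h.2]
      have hvp : ¬ v = p := fun hh => hp hh.symm
      simp [List.mem_cons, hvp]

lemma pvSum_ite_single (l : List Int) (q : Int → Prop) [DecidablePred q] (c : Int → Int)
    (j₀ : Int) (hnd : l.Nodup) (h : ∀ j ∈ l, q j → j = j₀) :
    (l.map (fun j => if q j then c j else 0)).sum = if j₀ ∈ l ∧ q j₀ then c j₀ else 0 := by
  induction l with
  | nil => simp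
  | cons x t ih =>
    simp only [List.nodup_cons] at hnd
    rw [List.map_cons, List.sum_cons]
    by_cases hq : q x
    · have hx : x = j₀ := h x (List.mem_cons_self ..) hq
      subst hx
      rw [if_pos hq, pvSum_zero t q c (by
        intro j hj hqj
        exact hnd.1 ((h j (List.mem_cons_of_mem _ hj) hqj) ▸ hj)),
        if_pos ⟨List.mem_cons_self .., hq⟩]
      ring
    · rw [if_neg hq, ih hnd.2 (fun j hj => h j (List.mem_cons_of_mem _ hj)), zero_add]
      by_cases hj0 : j₀ = x
      · subst hj0; simp [hq]
      · simp [List.mem_cons, fun hh : j₀ = x => hj0 hh]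

lemma pvSum_comm (l₁ : List Int) (l₂ : List String) (F : Int → String → Int) :
    (l₁.map (fun a => (l₂.map (F a)).sum)).sum = (l₂.map (fun b => (l₁.map (fun a => F a b)).sum)).sum := by
  induction l₁ with
  | nil => simp
  | cons a t ih =>
    rw [List.map_cons, List.sum_cons, ih]
    rw [← List.sum_map_add]
    congr 1

lemma pvSlice_len (s : String) (j i : Int) (h0 : 0 ≤ j) (hji : j < i)
    (hin : i ≤ (s.toList.length : Int)) :
    PySem.Str.len (PySem.Str.slice s (some j) (some i)) = i - j := by
  rw [PySem.Str.len_eq, PySem.Str.toList_slice, PySem.Chars.slice_eq_listSlice,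
    PySem.List.length_slice]
  rw [show j = ((j.toNat : Nat) : Int) from (Int.toNat_of_nonneg h0).symm,
    show i = ((i.toNat : Nat) : Int) from (Int.toNat_of_nonneg (by omega)).symm,
    PySem.List.clampIdx_natCast, PySem.List.clampIdx_natCast]
  omega

lemma pvInnerA (s : String) (parts : List String) (i : Int) :
    ∀ (js : List Int) (dp : List Int), 0 ≤ i → i.toNat < dp.length → (∀ j ∈ js, 0 ≤ j ∧ j < i) →
    js.foldl (fun dp j =>
        if PySem.List.pyGetD dp j 0 ≠ 0 ∧ PySem.Str.slice s (some j) (some i) ∈ parts then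
          PySem.List.pySetD dp i (PySem.List.pyGetD dp i 0 + PySem.List.pyGetD dp j 0)
        else dp) dp
    = PySem.List.pySetD dp i (PySem.List.pyGetD dp i 0 +
        (js.map (fun j => if PySem.List.pyGetD dp j 0 ≠ 0 ∧ PySem.Str.slice s (some j) (some i) ∈ parts
          then PySem.List.pyGetD dp j 0 else 0)).sum) := by
  intro js
  induction js with
  | nil =>
    intro dp h0 hl _
    simp [pvSet_get_self dp i h0 hl]
  | cons j t ih =>
    intro dp h0 hl hjs
    obtain ⟨hj0, hji⟩ := hjs j (List.mem_cons_self ..)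
    have hjne : j ≠ i := by omega
    rw [List.foldl_cons, List.map_cons, List.sum_cons]
    by_cases hc : PySem.List.pyGetD dp j 0 ≠ 0 ∧ PySem.Str.slice s (some j) (some i) ∈ parts
    · rw [if_pos hc]
      set dp1 := PySem.List.pySetD dp i (PySem.List.pyGetD dp i 0 + PySem.List.pyGetD dp j 0) with hdp1
      have hl1 : i.toNat < dp1.length := by rw [hdp1, PySem.List.length_pySetD]; exact hl
      rw [ih dp1 h0 hl1 (fun j' hj' => hjs j' (List.mem_cons_of_mem _ hj'))]
      have hget : ∀ j' : Int, 0 ≤ j' → j' < i →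
          PySem.List.pyGetD dp1 j' 0 = PySem.List.pyGetD dp j' 0 := by
        intro j' h0' hlt'
        exact pvGetSet_ne dp i j' _ h0 hl h0' (by omega)
      have hmap : t.map (fun j' => if PySem.List.pyGetD dp1 j' 0 ≠ 0 ∧ PySem.Str.slice s (some j') (some i) ∈ parts
            then PySem.List.pyGetD dp1 j' 0 else 0)
          = t.map (fun j' => if PySem.List.pyGetD dp j' 0 ≠ 0 ∧ PySem.Str.slice s (some j') (some i) ∈ parts
            then PySem.List.pyGetD dp j' 0 else 0) := by
        apply List.map_congr_left
        intro j' hj'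
        obtain ⟨h0', hlt'⟩ := hjs j' (List.mem_cons_of_mem _ hj')
        rw [hget j' h0' hlt']
      rw [hmap, pvGetSet_self dp i _ h0 hl, hdp1, pvSetSet dp i _ _ h0, if_pos hc]
      ring_nf
    · rw [if_neg hc, ih dp h0 hl (fun j' hj' => hjs j' (List.mem_cons_of_mem _ hj')), if_neg hc]
      ring_nf

lemma pvInnerB (s : String) (parts : List String) (i : Int) (dp : List Int) :
    parts.foldl (fun acc p =>
      if 0 < PySem.Str.len p ∧ PySem.Str.len p ≤ i ∧
          PySem.Str.slice s (some (i - PySem.Str.len p)) (some i) = p then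
        acc + PySem.List.pyGetD dp (i - PySem.Str.len p) 0
      else acc) 0
    = (parts.map (fun p => if 0 < PySem.Str.len p ∧ PySem.Str.len p ≤ i ∧
          PySem.Str.slice s (some (i - PySem.Str.len p)) (some i) = p
        then PySem.List.pyGetD dp (i - PySem.Str.len p) 0 else 0)).sum := by
  have hfe : (fun (acc : Int) p =>
      if 0 < PySem.Str.len p ∧ PySem.Str.len p ≤ i ∧
          PySem.Str.slice s (some (i - PySem.Str.len p)) (some i) = p then
        acc + PySem.List.pyGetD dp (i - PySem.Str.len p) 0
      else acc)
      = (fun acc p => acc + (if 0 < PySem.Str.len p ∧ PySem.Str.len p ≤ i ∧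
          PySem.Str.slice s (some (i - PySem.Str.len p)) (some i) = p
        then PySem.List.pyGetD dp (i - PySem.Str.len p) 0 else 0)) := by
    funext acc p
    split <;> simp
  rw [hfe, PySem.List.foldl_add, zero_add]

lemma pvLen_nonneg (p : String) : 0 ≤ PySem.Str.len p := by
  rw [PySem.Str.len_eq]; positivity

lemma pvSum_eq (s : String) (parts : List String) (hnd : parts.Nodup) (i : Int) (dp : List Int)
    (_h1 : 1 ≤ i) (hin : i ≤ (s.toList.length : Int)) :
    ((PySem.List.pyRange 0 i 1).map (fun j =>
        if PySem.List.pyGetD dp j 0 ≠ 0 ∧ PySem.Str.slice s (some j) (some i) ∈ parts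
        then PySem.List.pyGetD dp j 0 else 0)).sum
    = (parts.map (fun p => if 0 < PySem.Str.len p ∧ PySem.Str.len p ≤ i ∧
          PySem.Str.slice s (some (i - PySem.Str.len p)) (some i) = p
        then PySem.List.pyGetD dp (i - PySem.Str.len p) 0 else 0)).sum := by
  -- step 0: drop the dp[j] ≠ 0 guard
  have h0 : ((PySem.List.pyRange 0 i 1).map (fun j =>
        if PySem.List.pyGetD dp j 0 ≠ 0 ∧ PySem.Str.slice s (some j) (some i) ∈ parts
        then PySem.List.pyGetD dp j 0 else 0))
      = ((PySem.List.pyRange 0 i 1).map (fun j =>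
        if PySem.Str.slice s (some j) (some i) ∈ parts
        then PySem.List.pyGetD dp j 0 else 0)) := by
    apply List.map_congr_left
    intro j _
    by_cases hz : PySem.List.pyGetD dp j 0 = 0 <;>
      by_cases hm : PySem.Str.slice s (some j) (some i) ∈ parts <;> simp [hz, hm]
  rw [h0]
  -- step 1: membership as a sum over parts
  have h1' : ((PySem.List.pyRange 0 i 1).map (fun j =>
        if PySem.Str.slice s (some j) (some i) ∈ parts
        then PySem.List.pyGetD dp j 0 else 0))
      = ((PySem.List.pyRange 0 i 1).map (fun j =>
        (parts.map (fun p => if p = PySem.Str.slice s (some j) (some i)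
          then PySem.List.pyGetD dp j 0 else 0)).sum)) := by
    apply List.map_congr_left
    intro j _
    rw [pvSum_ite_mem parts _ _ hnd]
  rw [h1']
  -- step 2: exchange the two sums
  rw [pvSum_comm (PySem.List.pyRange 0 i 1) parts
    (fun j p => if p = PySem.Str.slice s (some j) (some i) then PySem.List.pyGetD dp j 0 else 0)]
  -- step 3: for each part the inner sum has at most one nonzero term
  congr 1
  apply List.map_congr_left
  intro p _
  rw [pvSum_ite_single (PySem.List.pyRange 0 i 1)
      (fun j => p = PySem.Str.slice s (some j) (some i))
      (fun j => PySem.List.pyGetD dp j 0)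
      (i - PySem.Str.len p)
      (PySem.List.nodup_pyRange_one 0 i)
      (by
        intro j hj hq
        rw [PySem.List.mem_pyRange_one] at hj
        have := pvSlice_len s j i hj.1 hj.2 hin
        rw [← hq] at this
        omega)]
  have hpn := pvLen_nonneg p
  by_cases hc : 0 < PySem.Str.len p ∧ PySem.Str.len p ≤ i ∧
      PySem.Str.slice s (some (i - PySem.Str.len p)) (some i) = p
  · rw [if_pos hc, if_pos ⟨PySem.List.mem_pyRange_one.mpr (by omega), hc.2.2.symm⟩]
  · rw [if_neg hc, if_neg]
    intro ⟨hmem, hq⟩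
    rw [PySem.List.mem_pyRange_one] at hmem
    exact hc ⟨by omega, by omega, hq.symm⟩

def pvStepA (s : String) (parts : List String) (dp : List Int) (i : Int) : List Int :=
  (PySem.List.pyRange 0 i 1).foldl (fun dp j =>
    if PySem.List.pyGetD dp j 0 ≠ 0 ∧ PySem.Str.slice s (some j) (some i) ∈ parts then
      PySem.List.pySetD dp i (PySem.List.pyGetD dp i 0 + PySem.List.pyGetD dp j 0)
    else dp) dp

def pvStepB (s : String) (parts : List String) (dp : List Int) (i : Int) : List Int :=
  PySem.List.pySetD dp i (parts.foldl (fun acc p =>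
    if 0 < PySem.Str.len p ∧ PySem.Str.len p ≤ i ∧
        PySem.Str.slice s (some (i - PySem.Str.len p)) (some i) = p then
      acc + PySem.List.pyGetD dp (i - PySem.Str.len p) 0
    else acc) 0)

lemma pvStep_eq (s : String) (parts : List String) (hnd : parts.Nodup) (i : Int) (dp : List Int)
    (h1 : 1 ≤ i) (hin : i ≤ (s.toList.length : Int)) (hlen : dp.length = s.toList.length + 1)
    (hz : dp.getD i.toNat 0 = 0) :
    pvStepA s parts dp i = pvStepB s parts dp i := by
  have h0 : (0:Int) ≤ i := by omega
  have hl : i.toNat < dp.length := by omega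
  rw [pvStepA, pvInnerA s parts i (PySem.List.pyRange 0 i 1) dp h0 hl
    (fun j hj => PySem.List.mem_pyRange_one.mp hj)]
  rw [pvStepB, pvInnerB]
  have hdpi : PySem.List.pyGetD dp i 0 = 0 := by
    rw [show i = ((i.toNat : Nat) : Int) from (Int.toNat_of_nonneg h0).symm,
      PySem.List.pyGetD_natCast]
    exact hz
  rw [hdpi, zero_add, pvSum_eq s parts hnd i dp h1 hin]

lemma pvOuter (s : String) (parts : List String) (hnd : parts.Nodup) :
    ∀ (k : Nat) (dp : List Int), k ≤ s.toList.length →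
      dp.length = s.toList.length + 1 →
      (∀ m : Nat, s.toList.length + 1 - k ≤ m → dp.getD m 0 = 0) →
      (PySem.List.pyRange ((s.toList.length : Int) + 1 - k) ((s.toList.length : Int) + 1) 1).foldl
        (pvStepA s parts) dp
      = (PySem.List.pyRange ((s.toList.length : Int) + 1 - k) ((s.toList.length : Int) + 1) 1).foldl
        (pvStepB s parts) dp := by
  intro k
  induction k with
  | zero =>
    intro dp _ _ _
    rw [PySem.List.pyRange_one_eq_nil (by omega)]
    rfl
  | succ k ih =>
    intro dp hk hlen hz
    set N := s.toList.length with hN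
    have hcons : PySem.List.pyRange ((N : Int) + 1 - (k+1:Nat)) ((N : Int) + 1) 1
        = ((N : Int) - k) :: PySem.List.pyRange ((N : Int) + 1 - k) ((N : Int) + 1) 1 := by
      rw [PySem.List.pyRange_one_cons (by push_cast; omega)]
      congr 1 <;> push_cast <;> ring_nf
    rw [hcons, List.foldl_cons, List.foldl_cons]
    have hstep : pvStepA s parts dp ((N : Int) - k) = pvStepB s parts dp ((N : Int) - k) := by
      apply pvStep_eq s parts hnd _ dp (by omega) (by omega) hlen
      apply hz
      omega
    rw [hstep]
    set dp' := pvStepB s parts dp ((N : Int) - k) with hdp'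
    have hlen' : dp'.length = N + 1 := by
      rw [hdp', pvStepB, PySem.List.length_pySetD, hlen]
    apply ih dp' (by omega) hlen'
    intro m hm
    rw [hdp', pvStepB, PySem.List.pySetD_of_nonneg _ _ (by omega)]
    have hne : m ≠ ((N : Int) - k).toNat := by omega
    rw [List.getD_eq_getElem?_getD, List.getElem?_set_ne (by omega), ← List.getD_eq_getElem?_getD]
    apply hz
    omega

-- ===== VERDICT (by name: the statement is the Claim_ definition above) =====
theorem count_ways_to_construct_spec : Claim_equal_count_ways_to_construct := by
  intro s parts _hdom hpre
  unfold Spec_count_ways_to_construct count_ways_to_construct count_ways_to_construct_alt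
  simp only [PySem.Str.len_eq]
  set N := s.toList.length with hN
  have ht1 : ((N:Int)+1).toNat = N+1 := by omega
  have ht2 : ((N:Int)).toNat = N := by omega
  have hdp0 : PySem.List.pySetD (List.replicate ((N:Int) + 1).toNat (0:Int)) 0 1
      = (1:Int) :: List.replicate N 0 := by
    rw [ht1, PySem.List.pySetD_of_nonneg _ _ (by omega), List.replicate_succ]
    rfl
  rw [hdp0, ht2]
  have key := pvOuter s parts hpre N ((1:Int) :: List.replicate N 0) (le_refl N)
    (by rw [List.length_cons, List.length_replicate]) (by
      intro m hm
      match m with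
      | 0 => omega
      | m'+1 => simp [List.getD])
  have hb : ((s.toList.length : Int) + 1 - (N:Nat)) = 1 := by rw [← hN]; ring
  rw [hb, ← hN] at key
  show PySem.List.pyGetD ((PySem.List.pyRange 1 ((N:Int)+1) 1).foldl (pvStepA s parts)
      ((1:Int) :: List.replicate N 0)) (N:Int) 0
    = PySem.List.pyGetD ((PySem.List.pyRange 1 ((N:Int)+1) 1).foldl (pvStepB s parts)
      ((1:Int) :: List.replicate N 0)) (N:Int) 0
  rw [key]
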